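-- pv_equiv track=rewrite | github.com/Manoj-0202/real-testing | generated_runs/src/lib/smart_ai.py | _candidate_roles
-- ===== SOURCE A (Python) =====
-- def _candidate_roles(element: dict):
--     '''
--     Infer likely roles from ocr_type/tag_name + intent.
--     Uses intent to avoid picking textbox when we really want a button.
--     '''
--     ocr = (element.get("ocr_type") or "").lower()
--     tag = (element.get("tag_name") or "").lower()
--     intent = (element.get("intent") or "").lower()
--
--     roles = []
--
--     # Heuristic: if intent is click-ish, strongly prefer button/link/combobox
--     clickish = any(
--         k in intent
--         for k in [
--             "click",
--             "submit",
--             "delete",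
--             "remove",
--             "add",
--             "create",
--             "open",
--             "next",
--             "previous",
--             "save",
--             "confirm",
--             "ok",
--             "proceed",
--         ]
--     )
--     inputish = any(
--         k in intent for k in ["type", "enter", "fill", "search", "filter", "input"]
--     )
--
--     # Primary from ocr/tag
--     if ocr in ("button", "submit", "iconbutton") or tag == "button":
--         roles.append("button")
--     if ocr in ("select", "dropdown", "combobox") or tag == "select":
--         roles.append("combobox")
--     if ocr in ("textbox", "text", "input", "email", "password") or tag in (
--         "input",
--         "textarea",
--     ):
--         roles.append("textbox")
--     if ocr in ("link", "anchor") or tag == "a":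
--         roles.append("link")
--
--     # Adjust ordering based on intent
--     if clickish:
--         ordered = []
--         for r in ("button", "link", "combobox", "textbox"):
--             if r in roles and r not in ordered:
--                 ordered.append(r)
--         if "textbox" in ordered:
--             ordered.remove("textbox")
--             ordered.append("textbox")
--         roles = ordered
--     elif inputish:
--         ordered = []
--         for r in ("textbox", "combobox", "button", "link"):
--             if r in roles and r not in ordered:
--                 ordered.append(r)
--         roles = ordered
--
--     # Always add generic fallbacks (order respected)
--     for r in ("button", "combobox", "textbox", "link"):
--         if r not in roles:
--             roles.append(r)
--     return roles
-- ===== SOURCE B (Python) =====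
-- def _candidate_roles(element: dict):
--     """Priority-table + stable sort instead of build/reorder/fill loops."""
--     ocr = (element.get("ocr_type") or "").lower()
--     tag = (element.get("tag_name") or "").lower()
--     intent = (element.get("intent") or "").lower()
--
--     clickish = any(
--         k in intent
--         for k in [
--             "click", "submit", "delete", "remove", "add", "create", "open",
--             "next", "previous", "save", "confirm", "ok", "proceed",
--         ]
--     )
--     inputish = any(
--         k in intent for k in ["type", "enter", "fill", "search", "filter", "input"]
--     )
--
--     matched = {
--         "button": ocr in ("button", "submit", "iconbutton") or tag == "button",
--         "combobox": ocr in ("select", "dropdown", "combobox") or tag == "select",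
--         "textbox": ocr in ("textbox", "text", "input", "email", "password")
--                    or tag in ("input", "textarea"),
--         "link": ocr in ("link", "anchor") or tag == "a",
--     }
--
--     if clickish:
--         mrank = {"button": 0, "link": 1, "combobox": 2, "textbox": 3}
--     elif inputish:
--         mrank = {"textbox": 0, "combobox": 1, "button": 2, "link": 3}
--     else:
--         mrank = {"button": 0, "combobox": 1, "textbox": 2, "link": 3}
--     urank = {"button": 0, "combobox": 1, "textbox": 2, "link": 3}
--
--     return sorted(
--         ["button", "combobox", "textbox", "link"],
--         key=lambda r: (0, mrank[r]) if matched[r] else (1, urank[r]),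
--     )
-- ===== Notes on version B (the rewrite author's own statement) =====
-- stated objective: alternative
-- what changed: Replaces A's build-matched-list, intent-dependent reorder loops (including the move-textbox-to-end step) and fill-missing-roles loop by computing per-role matched flags and an intent-bucket priority table, then returning the four fixed roles stably sorted by the (matched, rank) key.
import Mathlib
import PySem

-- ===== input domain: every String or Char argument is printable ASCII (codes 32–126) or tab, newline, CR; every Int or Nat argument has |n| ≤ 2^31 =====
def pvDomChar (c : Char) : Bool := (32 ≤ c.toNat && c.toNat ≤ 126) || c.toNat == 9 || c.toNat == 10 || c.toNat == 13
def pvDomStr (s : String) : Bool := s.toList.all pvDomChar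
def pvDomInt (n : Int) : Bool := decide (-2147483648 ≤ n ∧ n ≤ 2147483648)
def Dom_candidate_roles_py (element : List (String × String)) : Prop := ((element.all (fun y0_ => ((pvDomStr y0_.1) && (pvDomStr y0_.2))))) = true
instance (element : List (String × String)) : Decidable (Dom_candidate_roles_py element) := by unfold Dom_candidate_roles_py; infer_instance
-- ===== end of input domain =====

-- B replaces A's build-list / reorder / fill-missing control flow by a single stable
-- sort of the four fixed roles under a (matched, rank) priority key: alternative decomposition.


-- ===== PORT A =====
def pvClickKeys : List String :=
  ["click","submit","delete","remove","add","create","open","next","previous","save","confirm","ok","proceed"]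
def pvInputKeys : List String :=
  ["type","enter","fill","search","filter","input"]

-- core of A on the three lowered fields (A's body after the three .get(...).lower() lines)
def pvRolesA (ocr tag intent : String) : List String :=
  let clickish := pvClickKeys.any (fun k => PySem.Str.isIn k intent)
  let inputish := pvInputKeys.any (fun k => PySem.Str.isIn k intent)
  let roles : List String := []
  let roles := if (ocr = "button" ∨ ocr = "submit" ∨ ocr = "iconbutton") ∨ tag = "button" then roles ++ ["button"] else roles
  let roles := if (ocr = "select" ∨ ocr = "dropdown" ∨ ocr = "combobox") ∨ tag = "select" then roles ++ ["combobox"] else roles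
  let roles := if (ocr = "textbox" ∨ ocr = "text" ∨ ocr = "input" ∨ ocr = "email" ∨ ocr = "password") ∨ (tag = "input" ∨ tag = "textarea") then roles ++ ["textbox"] else roles
  let roles := if (ocr = "link" ∨ ocr = "anchor") ∨ tag = "a" then roles ++ ["link"] else roles
  let roles :=
    if clickish then
      let ordered := (["button","link","combobox","textbox"] : List String).foldl
        (fun ordered r => if r ∈ roles ∧ r ∉ ordered then ordered ++ [r] else ordered) []
      -- ordered.remove("textbox") under the membership guard
      let ordered := if "textbox" ∈ ordered then
          ((PySem.List.remove? ordered "textbox").getD ordered) ++ ["textbox"]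
        else ordered
      ordered
    else if inputish then
      (["textbox","combobox","button","link"] : List String).foldl
        (fun ordered r => if r ∈ roles ∧ r ∉ ordered then ordered ++ [r] else ordered) []
    else roles
  (["button","combobox","textbox","link"] : List String).foldl
    (fun roles r => if r ∉ roles then roles ++ [r] else roles) roles

def candidate_roles_py (element : List (String × String)) : List String :=
  pvRolesA (PySem.Str.lower (((PySem.Dict.mk element).get? "ocr_type").getD ""))
           (PySem.Str.lower (((PySem.Dict.mk element).get? "tag_name").getD ""))
           (PySem.Str.lower (((PySem.Dict.mk element).get? "intent").getD ""))

-- ===== PORT B =====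
-- core of B on the three lowered fields: priority table + stable sort
def pvRolesB (ocr tag intent : String) : List String :=
  let clickish := pvClickKeys.any (fun k => PySem.Str.isIn k intent)
  let inputish := pvInputKeys.any (fun k => PySem.Str.isIn k intent)
  let matched : String → Bool := fun r =>
    if r = "button" then decide ((ocr = "button" ∨ ocr = "submit" ∨ ocr = "iconbutton") ∨ tag = "button")
    else if r = "combobox" then decide ((ocr = "select" ∨ ocr = "dropdown" ∨ ocr = "combobox") ∨ tag = "select")
    else if r = "textbox" then decide ((ocr = "textbox" ∨ ocr = "text" ∨ ocr = "input" ∨ ocr = "email" ∨ ocr = "password") ∨ (tag = "input" ∨ tag = "textarea"))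
    else decide ((ocr = "link" ∨ ocr = "anchor") ∨ tag = "a")
  let mrank : String → Int :=
    if clickish then fun r => if r = "button" then 0 else if r = "link" then 1 else if r = "combobox" then 2 else 3
    else if inputish then fun r => if r = "textbox" then 0 else if r = "combobox" then 1 else if r = "button" then 2 else 3
    else fun r => if r = "button" then 0 else if r = "combobox" then 1 else if r = "textbox" then 2 else 3
  let urank : String → Int := fun r => if r = "button" then 0 else if r = "combobox" then 1 else if r = "textbox" then 2 else 3
  PySem.List.sorted2 (["button","combobox","textbox","link"] : List String)
    (fun r => if matched r then (0 : Int) else 1)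
    (fun r => if matched r then mrank r else urank r) false

def candidate_roles_py_alt (element : List (String × String)) : List String :=
  pvRolesB (PySem.Str.lower (((PySem.Dict.mk element).get? "ocr_type").getD ""))
           (PySem.Str.lower (((PySem.Dict.mk element).get? "tag_name").getD ""))
           (PySem.Str.lower (((PySem.Dict.mk element).get? "intent").getD ""))

-- ===== PRECONDITION & SPEC =====
def Spec_candidate_roles_py (element : List (String × String)) (out : List String) : Prop := out = candidate_roles_py_alt element
instance (element : List (String × String)) (out : List String) : Decidable (Spec_candidate_roles_py element out) := by unfold Spec_candidate_roles_py; infer_instance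

-- ===== CLAIM (what is proved, stated in full; the proofs are below) =====
def Claim_equal_candidate_roles_py : Prop := ∀ (element : List (String × String)), Dom_candidate_roles_py element → Spec_candidate_roles_py element (candidate_roles_py element)

-- ===== LEMMAS AND PROOFS =====
theorem pvRoles_eq (ocr tag intent : String) : pvRolesA ocr tag intent = pvRolesB ocr tag intent := by
  unfold pvRolesA pvRolesB
  by_cases hck : pvClickKeys.any (fun k => PySem.Str.isIn k intent) = true <;>
  by_cases hip : pvInputKeys.any (fun k => PySem.Str.isIn k intent) = true <;>
  by_cases hb : (ocr = "button" ∨ ocr = "submit" ∨ ocr = "iconbutton") ∨ tag = "button" <;>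
  by_cases hc : (ocr = "select" ∨ ocr = "dropdown" ∨ ocr = "combobox") ∨ tag = "select" <;>
  by_cases ht : (ocr = "textbox" ∨ ocr = "text" ∨ ocr = "input" ∨ ocr = "email" ∨ ocr = "password") ∨ (tag = "input" ∨ tag = "textarea") <;>
  by_cases hl : (ocr = "link" ∨ ocr = "anchor") ∨ tag = "a" <;>
  simp only [hck, hip, hb, hc, ht, hl, decide_true, decide_false, Bool.false_eq_true,
    if_pos, if_neg, not_false_iff] <;>
  simp [ht, hl] <;> rfl

-- ===== VERDICT (by name: the statement is the Claim_ definition above) =====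
theorem candidate_roles_py_spec : Claim_equal_candidate_roles_py := by
  intro element _
  unfold Spec_candidate_roles_py candidate_roles_py candidate_roles_py_alt
  exact pvRoles_eq _ _ _
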